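-- pv_equiv track=rewrite | github.com/piekarczvk/Computer-Network-Security-Coursework-2 | encryptionSys2.py | generate_e
-- ===== SOURCE A (Python) =====
-- def generate_e(n):
--     if n <= 0:
--         return []
--     result = [1]
--     for i in range(1, n):
--         next_element = sum(result) + 1
--         result.append(next_element)
--     return result
-- ===== SOURCE B (Python) =====
-- def generate_e(n):
--     return [2 ** i for i in range(n)]
-- ===== Notes on version B (the rewrite author's own statement) =====
-- stated objective: faster
-- what changed: Replaced the quadratic loop that re-sums the whole list each step with a direct comprehension emitting successive powers of two (the closed form of the recurrence).
import Mathlib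
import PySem

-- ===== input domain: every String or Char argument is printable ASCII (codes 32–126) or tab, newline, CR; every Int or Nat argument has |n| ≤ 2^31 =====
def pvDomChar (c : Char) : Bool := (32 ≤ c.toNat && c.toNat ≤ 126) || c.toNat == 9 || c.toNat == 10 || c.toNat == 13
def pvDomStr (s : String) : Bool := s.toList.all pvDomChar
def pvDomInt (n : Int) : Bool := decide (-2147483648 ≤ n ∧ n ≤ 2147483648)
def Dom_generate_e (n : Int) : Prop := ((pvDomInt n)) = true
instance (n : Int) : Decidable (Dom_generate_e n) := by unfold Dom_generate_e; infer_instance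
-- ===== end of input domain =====

-- B replaces A's quadratic re-summing loop with the closed form 2**i (objective: faster).

-- ===== PORT A =====
def generate_e (n : Int) : List Int :=
  if n ≤ 0 then []
  else (PySem.List.pyRange 1 n 1).foldl (fun result _ => result ++ [result.sum + 1]) [1]

-- ===== PORT B =====
def generate_e_alt (n : Int) : List Int :=
  (PySem.List.pyRange 0 n 1).map (fun i => 2 ^ i.toNat)

-- ===== PRECONDITION & SPEC =====
def Spec_generate_e (n : Int) (out : List Int) : Prop := out = generate_e_alt n
instance (n : Int) (out : List Int) : Decidable (Spec_generate_e n out) := by unfold Spec_generate_e; infer_instance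

-- ===== CLAIM (what is proved, stated in full; the proofs are below) =====
def Claim_equal_generate_e : Prop := ∀ (n : Int), Dom_generate_e n → Spec_generate_e n (generate_e n)

-- ===== LEMMAS AND PROOFS =====

-- sum of the first m powers of two
theorem pv_sum_pows (m : Nat) :
    ((List.range m).map (fun k => (2:Int) ^ k)).sum = 2 ^ m - 1 := by
  induction m with
  | zero => simp
  | succ m ih => simp [List.range_succ, ih]; ring

-- A's loop over range(1, m) produces the powers of two, for m ≥ 1
theorem pv_loop (m : Nat) (hm : 1 ≤ m) :
    (PySem.List.pyRange 1 (m : Int) 1).foldl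
        (fun result _ => result ++ [result.sum + 1]) [1]
      = (List.range m).map (fun k => (2:Int) ^ k) := by
  induction m with
  | zero => omega
  | succ m ih =>
    by_cases hm1 : 1 ≤ m
    · have hsplit : PySem.List.pyRange 1 ((m : Int) + 1) 1
          = PySem.List.pyRange 1 (m : Int) 1 ++ [(m : Int)] := by
        exact PySem.List.pyRange_one_succ_right (by exact_mod_cast hm1)
      push_cast
      rw [hsplit, List.foldl_append, ih hm1]
      simp [List.range_succ, pv_sum_pows]
    · have hm0 : m = 0 := by omega
      subst hm0
      push_cast
      rw [PySem.List.pyRange_one_eq_nil (by norm_num)]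
      simp

-- ===== VERDICT (by name: the statement is the Claim_ definition above) =====
theorem generate_e_spec : Claim_equal_generate_e := by
  intro n _
  unfold Spec_generate_e generate_e generate_e_alt
  by_cases h : n ≤ 0
  · rw [if_pos h, PySem.List.pyRange_one_eq_nil h]
    simp
  · rw [if_neg h]
    push Not at h
    obtain ⟨m, rfl⟩ : ∃ m : Nat, n = (m : Int) := ⟨n.toNat, (Int.toNat_of_nonneg h.le).symm⟩
    have hm : 1 ≤ m := by exact_mod_cast h
    rw [pv_loop m hm, PySem.List.pyRange_one]
    simp
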